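-- pv_equiv track=rewrite | github.com/denniselorm/python_projects | Elements with Lower Magnitude Succeeding Values/Elements with Lower Magnitude Succeeding Values/Elements_with_Lower_Magnitude_Succeeding_Values.py | ttlSpan
-- ===== SOURCE A (Python) =====
-- import copy
--
-- def ttlSpan(array1):
--     array2 = copy.copy(array1)
--     l = 0
--     dcount = 0
--     while l < len(array2):
--         n = 0
--         var = []
--         contntf = 0
--         while n < len(array2)-1:
--             if n+1 < len(array2):
--                 if array2[n] < array2[n+1]:
--                     var.append(array2[n+1])
--                     contntf += 1
--             n += 1
--         if contntf == 0:
--             break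
--         for m in range(len(var)):
--             array2.remove(var[m])
--         dcount += 1
--         l = 0
--     return dcount
-- ===== SOURCE B (Python) =====
-- import copy
--
-- def ttlSpan(array1):
--     arr = copy.copy(array1)
--     passes = 0
--     while True:
--         rises = [y for x, y in zip(arr, arr[1:]) if x < y]
--         cnt = {}
--         for y in rises:
--             cnt[y] = cnt.get(y, 0) + 1
--         if not cnt:
--             return passes
--         rebuilt = []
--         for v in arr:
--             if cnt.get(v, 0) > 0:
--                 cnt[v] = cnt.get(v, 0) - 1
--             else:
--                 rebuilt.append(v)
--         arr = rebuilt
--         passes += 1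
-- ===== Notes on version B (the rewrite author's own statement) =====
-- stated objective: faster
-- what changed: Each pass now builds a multiset (dict) of the values to delete and rebuilds the array in one left-to-right sweep skipping leftmost occurrences, instead of calling list.remove (a fresh O(n) scan-and-shift) once per deleted value; the ascent scan uses zip instead of indexing.
import Mathlib
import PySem

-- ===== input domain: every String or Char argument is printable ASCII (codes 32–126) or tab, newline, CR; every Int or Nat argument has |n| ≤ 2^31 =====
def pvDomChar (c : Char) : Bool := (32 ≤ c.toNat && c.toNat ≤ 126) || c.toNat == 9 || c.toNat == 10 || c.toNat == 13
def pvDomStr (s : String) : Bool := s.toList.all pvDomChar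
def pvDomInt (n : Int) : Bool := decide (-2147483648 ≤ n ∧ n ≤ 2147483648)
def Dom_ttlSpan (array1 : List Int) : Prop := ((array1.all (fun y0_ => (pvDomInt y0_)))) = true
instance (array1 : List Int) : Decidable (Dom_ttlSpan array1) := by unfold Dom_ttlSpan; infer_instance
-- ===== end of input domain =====

-- B replaces A's per-value list.remove deletion (one scan per deleted value) by a per-pass
-- multiset (dict) of removal values and a single rebuild sweep (objective: faster per-pass
-- removal mechanism).

-- ===== PORT A =====
-- inner while loop collecting the successors of ascents; indices n and n+1 are always in
-- range when read, so pyGetD matches Python's a[n] exactly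
def varA (a : List Int) : List Int :=
  (PySem.List.pyRange 0 (PySem.List.len a - 1) 1).foldl
    (fun var n =>
      if n + 1 < PySem.List.len a then
        if PySem.List.pyGetD a n 0 < PySem.List.pyGetD a (n + 1) 0 then
          var ++ [PySem.List.pyGetD a (n + 1) 0]
        else var
      else var) []

-- for m in range(len(var)): array2.remove(var[m]); every removed value is present, so
-- remove? never returns none here (the .getD default is unreachable)
def removeA (a var : List Int) : List Int :=
  (PySem.List.pyRange 0 (PySem.List.len var) 1).foldl
    (fun l m => (PySem.List.remove? l (PySem.List.pyGetD var m 0)).getD l) a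

-- outer while loop; fuel (length+1) is a totality guard only: each iteration that recurses
-- removes at least one element
def ttlSpanLoopA : Nat → List Int → Int → Int
  | 0, _, dcount => dcount
  | fuel+1, a, dcount =>
    if a.length = 0 then dcount           -- while l < len(array2) fails with l = 0
    else if (varA a).length = 0 then dcount   -- if contntf == 0: break
    else ttlSpanLoopA fuel (removeA a (varA a)) (dcount + 1)

def ttlSpan (array1 : List Int) : Int := ttlSpanLoopA (array1.length + 1) array1 0

-- ===== PORT B =====
-- [y for x, y in zip(arr, arr[1:]) if x < y]
def risesB (arr : List Int) : List Int :=
  ((arr.zip (PySem.List.slice arr (some 1) none)).filter (fun p => decide (p.1 < p.2))).map Prod.snd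

-- B's while True loop: build the dict of removal counts, then one rebuild sweep carrying
-- (cnt, rebuilt); same fuel guard as A's port
def ttlSpanLoopB : Nat → List Int → Int → Int
  | 0, _, passes => passes
  | fuel+1, arr, passes =>
    if ((risesB arr).foldl (fun (d : PySem.Dict Int Int) y => d.insert y (d.getD y 0 + 1))
        PySem.Dict.empty).items = [] then passes   -- if not cnt: return passes
    else
      ttlSpanLoopB fuel
        (arr.foldl
          (fun (s : PySem.Dict Int Int × List Int) v =>
            if s.1.getD v 0 > 0 then (s.1.insert v (s.1.getD v 0 - 1), s.2)
            else (s.1, s.2 ++ [v]))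
          (((risesB arr).foldl (fun (d : PySem.Dict Int Int) y => d.insert y (d.getD y 0 + 1))
            PySem.Dict.empty), ([] : List Int))).2
        (passes + 1)

def ttlSpan_alt (array1 : List Int) : Int := ttlSpanLoopB (array1.length + 1) array1 0

-- ===== PRECONDITION & SPEC =====
def Spec_ttlSpan (array1 : List Int) (out : Int) : Prop := out = ttlSpan_alt array1
instance (array1 : List Int) (out : Int) : Decidable (Spec_ttlSpan array1 out) := by unfold Spec_ttlSpan; infer_instance

-- ===== CLAIM (what is proved, stated in full; the proofs are below) =====
def Claim_equal_ttlSpan : Prop := ∀ (array1 : List Int), Dom_ttlSpan array1 → Spec_ttlSpan array1 (ttlSpan array1)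

-- ===== LEMMAS AND PROOFS =====

-- skip, for each value v, the first (c v) occurrences of v
def skipF (c : Int → Int) : List Int → List Int
  | [] => []
  | x :: xs => if c x > 0 then skipF (fun w => if w = x then c w - 1 else c w) xs
               else x :: skipF c xs

theorem skipF_congr (c c' : Int → Int) (h : ∀ x, c x = c' x) :
    ∀ a, skipF c a = skipF c' a := by
  intro a
  induction a generalizing c c' with
  | nil => rfl
  | cons x xs ih =>
    simp only [skipF, h x]
    split_ifs with hx
    · exact ih _ _ (fun w => by simp [h])
    · rw [ih c c' h]

theorem skipF_inc (a : List Int) : ∀ (c : Int → Int) (v : Int), v ∈ a → (∀ w, 0 ≤ c w) →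
    skipF (fun w => if w = v then c w + 1 else c w) a = skipF c (a.erase v) := by
  induction a with
  | nil => intro c v hv; simp at hv
  | cons x xs ih =>
    intro c v hv hnn
    by_cases hxv : x = v
    · subst hxv
      simp only [skipF, List.erase_cons_head]
      have hcond : (if True then c x + 1 else c x) > 0 := by
        simp only [if_true]; have := hnn x; omega
      rw [if_pos hcond]
      refine skipF_congr _ _ (fun w => ?_) xs
      by_cases hw : w = x
      · subst hw; simp
      · simp [hw]
    · have hv' : v ∈ xs := by cases hv with
        | head => exact absurd rfl hxv
        | tail _ h => exact h
      have herase : (x :: xs).erase v = x :: xs.erase v := by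
        rw [List.erase_cons_tail]
        simp [hxv]
      rw [herase]
      simp only [skipF, if_neg hxv]
      split_ifs with hx
      · have := ih (fun w => if w = x then c w - 1 else c w) v hv'
          (fun w => by by_cases hw : w = x <;> simp [hw, hnn w] <;> omega)
        rw [← this]
        exact skipF_congr _ _
          (fun w => by by_cases hw : w = x <;> by_cases hwv : w = v <;>
            simp [hw, hwv, hxv] <;> simp_all) xs
      · rw [ih c v hv' hnn]

theorem foldl_remove_eq_skipF (var : List Int) : ∀ (a : List Int),
    (∀ v, (var.count v : Int) ≤ (a.count v : Int)) →
    var.foldl (fun l v => (PySem.List.remove? l v).getD l) a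
      = skipF (fun v => (var.count v : Int)) a := by
  induction var with
  | nil =>
    intro a _
    simp only [List.foldl_nil]
    have hz : ∀ b, skipF (fun _ => (0 : Int)) b = b := by
      intro b; induction b with
      | nil => rfl
      | cons x xs ihx => simp [skipF, ihx]
    rw [skipF_congr _ (fun _ => (0 : Int)) (fun w => by simp), hz]
  | cons v vs ih =>
    intro a hle
    have hv : v ∈ a := by
      have h1 := hle v
      rw [List.count_cons_self] at h1
      push_cast at h1
      have : 0 < a.count v := by omega
      exact List.count_pos_iff.mp this
    have hrem : PySem.List.remove? a v = some (a.erase v) :=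
      PySem.List.remove?_eq_some_erase a v hv
    simp only [List.foldl_cons, hrem, Option.getD_some]
    have hle' : ∀ w, (vs.count w : Int) ≤ ((a.erase v).count w : Int) := by
      intro w
      by_cases hw : w = v
      · rw [hw]
        have h1 := hle v
        rw [List.count_cons_self] at h1
        have hpos : 0 < a.count v := List.count_pos_iff.mpr hv
        rw [List.count_erase_self]
        push_cast [Nat.cast_sub (by omega : 1 ≤ a.count v)] at *
        omega
      · rw [List.count_erase_of_ne hw]
        have h1 := hle w
        rw [List.count_cons_of_ne (fun h => hw h.symm)] at h1
        exact h1
    rw [ih _ hle']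
    rw [← skipF_inc a (fun w => (vs.count w : Int)) v hv (fun w => by positivity)]
    exact (skipF_congr _ _ (fun w => by
      by_cases hw : w = v
      · rw [hw]; simp [List.count_cons_self]
      · rw [List.count_cons_of_ne (fun h => hw h.symm), if_neg hw]) a).symm

-- the dict-based rebuild equals skipF on the dict's counts
theorem rebuild_eq_skipF (a : List Int) : ∀ (d : PySem.Dict Int Int) (out : List Int),
    (a.foldl (fun (s : PySem.Dict Int Int × List Int) v =>
        if s.1.getD v 0 > 0 then (s.1.insert v (s.1.getD v 0 - 1), s.2)
        else (s.1, s.2 ++ [v])) (d, out)).2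
      = out ++ skipF (fun v => d.getD v 0) a := by
  induction a with
  | nil => intro d out; simp [skipF]
  | cons x xs ih =>
    intro d out
    simp only [List.foldl_cons, skipF]
    split_ifs with hx
    · rw [ih]
      congr 1
      refine skipF_congr _ _ (fun w => ?_) xs
      rw [PySem.Dict.getD_insert]
      by_cases hw : w = x <;> simp [hw]
    · rw [ih]
      simp

-- the shared characterisation of one pass's removal values
def risesL (a : List Int) : List Int :=
  ((a.zip a.tail).filter (fun p => decide (p.1 < p.2))).map Prod.snd

theorem risesB_eq_risesL (a : List Int) : risesB a = risesL a := by
  unfold risesB risesL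
  rw [PySem.List.slice_from_one]

theorem zip_tail_eq_map_range (a : List Int) :
    a.zip a.tail = (List.range (a.length - 1)).map
      (fun k => (a.getD k 0, a.getD (k + 1) 0)) := by
  apply List.ext_getElem
  · simp only [List.length_zip, List.length_tail, List.length_map, List.length_range]
    omega
  · intro k h1 h2
    have hk : k < a.length - 1 := by simpa using h2
    have hklen : k < a.length := by omega
    rw [List.getElem_zip, List.getElem_map, List.getElem_range]
    have e1 : a[k] = a.getD k 0 := (List.getD_eq_getElem a 0 hklen).symm
    have hktail : k < a.tail.length := by rw [List.length_tail]; omega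
    have e2 : a.tail[k]'hktail = a.getD (k + 1) 0 := by
      rw [List.getElem_tail, ← List.getD_eq_getElem a 0 (by omega : k + 1 < a.length)]
    rw [e1, e2]

theorem varA_eq_risesL (a : List Int) : varA a = risesL a := by
  unfold varA
  rw [PySem.List.pyRange_one]
  have hcast : (PySem.List.len a - 1 - 0).toNat = a.length - 1 := by
    simp [PySem.List.len]
  rw [hcast, List.foldl_map]
  have hbody : ∀ (acc : List Int), ∀ k ∈ List.range (a.length - 1),
      (fun var n =>
        if n + 1 < PySem.List.len a then
          if PySem.List.pyGetD a n 0 < PySem.List.pyGetD a (n + 1) 0 then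
            var ++ [PySem.List.pyGetD a (n + 1) 0]
          else var
        else var) acc ((0 : Int) + (k : Int))
      = (fun var (k : Nat) =>
          if decide (a.getD k 0 < a.getD (k + 1) 0) = true then
            var ++ [a.getD (k + 1) 0]
          else var) acc k := by
    intro acc k hk
    simp only [List.mem_range] at hk
    show (if (0 : Int) + (k : Int) + 1 < PySem.List.len a then
        if PySem.List.pyGetD a ((0 : Int) + (k : Int)) 0
            < PySem.List.pyGetD a ((0 : Int) + (k : Int) + 1) 0 then
          acc ++ [PySem.List.pyGetD a ((0 : Int) + (k : Int) + 1) 0]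
        else acc
      else acc)
      = if decide (a.getD k 0 < a.getD (k + 1) 0) = true then acc ++ [a.getD (k + 1) 0] else acc
    have h1 : (0 : Int) + (k : Int) + 1 < PySem.List.len a := by
      simp only [PySem.List.len]; omega
    rw [if_pos h1]
    have e1 : (0 : Int) + (k : Int) + 1 = (((k + 1 : Nat)) : Int) := by push_cast; ring
    have e0 : (0 : Int) + (k : Int) = ((k : Nat) : Int) := by push_cast; ring
    rw [e1, e0, PySem.List.pyGetD_natCast, PySem.List.pyGetD_natCast]
    simp
  rw [PySem.List.foldl_congr_mem _ _ _ _ hbody]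
  rw [PySem.List.foldl_append_if]
  unfold risesL
  rw [zip_tail_eq_map_range, List.filter_map, List.map_map]
  simp [Function.comp_def]

theorem risesL_count_le (a : List Int) (v : Int) : (risesL a).count v ≤ a.count v := by
  have hf : List.Sublist ((a.zip a.tail).filter (fun p => decide (p.1 < p.2))) (a.zip a.tail) :=
    List.filter_sublist
  have hm := hf.map Prod.snd
  rw [List.map_snd_zip (List.tail_sublist a).length_le] at hm
  exact ((hm.trans (List.tail_sublist a)).count_le v)

theorem counter_items_nil_iff (l : List Int) :
    (l.foldl (fun (d : PySem.Dict Int Int) y => d.insert y (d.getD y 0 + 1))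
      PySem.Dict.empty).items = [] ↔ l = [] := by
  rw [PySem.Dict.foldl_insert_getD_add_one_eq_counter, PySem.Dict.items_counter]
  constructor
  · intro h
    cases l with
    | nil => rfl
    | cons x xs =>
      exfalso
      have hx : x ∈ PySem.Set.ofList (x :: xs) := (PySem.Set.mem_ofList _ _).mpr (by simp)
      have := List.mem_map_of_mem (f := fun k => (k, ((x :: xs).count k : Int))) hx
      rw [h] at this
      simp at this
  · intro h; subst h; rfl

theorem removeA_eq_rebuild (a : List Int) (h : varA a ≠ []) :
    removeA a (varA a)
      = (a.foldl (fun (s : PySem.Dict Int Int × List Int) v =>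
          if s.1.getD v 0 > 0 then (s.1.insert v (s.1.getD v 0 - 1), s.2)
          else (s.1, s.2 ++ [v]))
          (((risesB a).foldl (fun (d : PySem.Dict Int Int) y => d.insert y (d.getD y 0 + 1))
            PySem.Dict.empty), ([] : List Int))).2 := by
  rw [rebuild_eq_skipF, List.nil_append]
  have hfold : removeA a (varA a)
      = (varA a).foldl (fun l v => (PySem.List.remove? l v).getD l) a := by
    unfold removeA
    exact PySem.List.foldl_pyRange_zero_pyGetD (varA a) 0
      (fun l v => (PySem.List.remove? l v).getD l) a
  rw [hfold]
  rw [foldl_remove_eq_skipF (varA a) a (by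
    intro v
    rw [varA_eq_risesL]
    exact_mod_cast risesL_count_le a v)]
  refine skipF_congr _ _ (fun w => ?_) a
  rw [PySem.Dict.foldl_insert_getD_add_one_eq_counter, PySem.Dict.getD_counter,
    risesB_eq_risesL, varA_eq_risesL]

theorem loops_eq (fuel : Nat) : ∀ (a : List Int) (d : Int),
    ttlSpanLoopA fuel a d = ttlSpanLoopB fuel a d := by
  induction fuel with
  | zero => intro a d; rfl
  | succ fuel ih =>
    intro a d
    by_cases ha : a.length = 0
    · have hnil : a = [] := List.length_eq_zero_iff.mp ha
      subst hnil
      rfl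
    · by_cases hv : (varA a).length = 0
      · have hnil : varA a = [] := List.length_eq_zero_iff.mp hv
        have hr : risesB a = [] := by rw [risesB_eq_risesL, ← varA_eq_risesL, hnil]
        simp only [ttlSpanLoopA, ttlSpanLoopB]
        rw [if_neg ha, if_pos hv, if_pos ((counter_items_nil_iff (risesB a)).mpr hr)]
      · have hvar : varA a ≠ [] := fun hh => hv (by simp [hh])
        have hr : risesB a ≠ [] := by
          rw [risesB_eq_risesL, ← varA_eq_risesL]; exact hvar
        simp only [ttlSpanLoopA, ttlSpanLoopB]
        rw [if_neg ha, if_neg hv, if_neg (fun hh => hr ((counter_items_nil_iff _).mp hh))]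
        rw [removeA_eq_rebuild a hvar]
        exact ih _ _

-- ===== VERDICT (by name: the statement is the Claim_ definition above) =====
theorem ttlSpan_spec : Claim_equal_ttlSpan := by
  intro array1 _
  unfold Spec_ttlSpan ttlSpan ttlSpan_alt
  exact loops_eq _ array1 0
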